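-- pv_equiv track=rewrite | github.com/gauenk/metaDatasetGenerator | lib/utils/base.py | check_list_and_list_equal_all
-- ===== SOURCE A (Python) =====
-- def check_list_and_list_equal_all(list_a,list_b):
--     if len(list_a) == 0 or len(list_b) == 0:
--         return False
--     for item_a in list_a:
--         for item_b in list_b:
--             if item_a != item_b:
--                 return False
--     return True
-- ===== SOURCE B (Python) =====
-- def check_list_and_list_equal_all(list_a, list_b):
--     if not list_a or not list_b:
--         return False
--     ref = list_a[0]
--     return all(x == ref for x in list_a) and all(x == ref for x in list_b)
-- ===== Notes on version B (the rewrite author's own statement) =====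
-- stated objective: faster
-- what changed: Replaces the nested all-pairs scan with two linear passes comparing every element of both lists to list_a[0] as a single reference.
import Mathlib
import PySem

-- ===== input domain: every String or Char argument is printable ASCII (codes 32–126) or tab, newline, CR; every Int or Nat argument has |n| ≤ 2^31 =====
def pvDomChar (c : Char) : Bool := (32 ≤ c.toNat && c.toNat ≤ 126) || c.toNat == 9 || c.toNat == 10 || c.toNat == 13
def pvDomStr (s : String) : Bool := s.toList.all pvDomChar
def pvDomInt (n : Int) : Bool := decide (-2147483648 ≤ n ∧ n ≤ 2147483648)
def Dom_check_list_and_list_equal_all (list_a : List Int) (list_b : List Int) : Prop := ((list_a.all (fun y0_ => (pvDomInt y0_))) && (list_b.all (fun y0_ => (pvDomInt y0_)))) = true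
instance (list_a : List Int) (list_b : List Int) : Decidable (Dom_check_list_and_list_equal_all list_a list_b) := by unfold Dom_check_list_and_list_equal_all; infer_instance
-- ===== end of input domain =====

-- B replaces A's nested all-pairs scan by two linear passes against the single
-- reference element list_a[0] (objective: faster, O(n+m) instead of O(n*m)).

-- ===== PORT A =====
-- inner 'for item_b in list_b' loop with early return False
def pvA_inner (item_a : Int) : List Int → Bool
  | [] => true
  | item_b :: rest => if item_a ≠ item_b then false else pvA_inner item_a rest

-- outer 'for item_a in list_a' loop
def pvA_outer (list_b : List Int) : List Int → Bool
  | [] => true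
  | item_a :: rest => if pvA_inner item_a list_b then pvA_outer list_b rest else false

def check_list_and_list_equal_all (list_a : List Int) (list_b : List Int) : Bool :=
  if list_a.length = 0 ∨ list_b.length = 0 then false
  else pvA_outer list_b list_a

-- ===== PORT B =====
def check_list_and_list_equal_all_alt (list_a : List Int) (list_b : List Int) : Bool :=
  match list_a, list_b with
  | [], _ => false
  | _, [] => false
  | ref :: _, _ => list_a.all (fun x => x == ref) && list_b.all (fun x => x == ref)

-- ===== PRECONDITION & SPEC =====
def Spec_check_list_and_list_equal_all (list_a : List Int) (list_b : List Int) (out : Bool) : Prop := out = check_list_and_list_equal_all_alt list_a list_b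
instance (list_a : List Int) (list_b : List Int) (out : Bool) : Decidable (Spec_check_list_and_list_equal_all list_a list_b out) := by unfold Spec_check_list_and_list_equal_all; infer_instance

-- ===== CLAIM (what is proved, stated in full; the proofs are below) =====
def Claim_equal_check_list_and_list_equal_all : Prop := ∀ (list_a : List Int) (list_b : List Int), Dom_check_list_and_list_equal_all list_a list_b → Spec_check_list_and_list_equal_all list_a list_b (check_list_and_list_equal_all list_a list_b)

-- ===== LEMMAS AND PROOFS =====
theorem pvA_inner_eq (a : Int) (lb : List Int) : pvA_inner a lb = lb.all (fun b => a == b) := by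
  induction lb with
  | nil => rfl
  | cons b rest ih =>
      simp [pvA_inner, ih]
      by_cases h : a = b <;> simp [h]

theorem pvA_outer_eq (lb la : List Int) :
    pvA_outer lb la = la.all (fun a => lb.all (fun b => a == b)) := by
  induction la with
  | nil => rfl
  | cons a rest ih =>
      simp only [pvA_outer, pvA_inner_eq, ih, List.all_cons]
      cases lb.all (fun b => a == b) <;> simp

theorem pv_key (r : Int) (rest lb : List Int) (hlb : lb ≠ []) :
    (List.all (r :: rest) fun a => lb.all (fun b => a == b))
      = ((List.all (r :: rest) fun x => x == r) && lb.all (fun x => x == r)) := by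
  cases lb with
  | nil => exact absurd rfl hlb
  | cons b bs =>
      rw [Bool.eq_iff_iff]
      simp only [List.all_eq_true, Bool.and_eq_true, beq_iff_eq]
      constructor
      · intro h
        have hrb : r = b := h r (by simp) b (by simp)
        exact ⟨fun x hx => (h x hx b (by simp)).trans hrb.symm,
               fun y hy => (h r (by simp) y hy).symm⟩
      · rintro ⟨h1, h2⟩
        intro x hx y hy
        exact (h1 x hx).trans (h2 y hy).symm

-- ===== VERDICT (by name: the statement is the Claim_ definition above) =====
theorem check_list_and_list_equal_all_spec : Claim_equal_check_list_and_list_equal_all := by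
  intro la lb _
  unfold Spec_check_list_and_list_equal_all check_list_and_list_equal_all check_list_and_list_equal_all_alt
  match la, lb with
  | [], _ => simp
  | a :: as, [] => simp
  | a :: as, b :: bs =>
      simp only [List.length_cons, pvA_outer_eq]
      rw [if_neg (by omega)]
      exact pv_key a as (b :: bs) (by simp)
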